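-- pv_equiv track=rewrite | github.com/MashuNakamura/SoloLearning | Codewars/15.py | perimeter
-- ===== SOURCE A (Python) =====
-- def perimeter(n):
--     if n == 0:
--         return 4
--
--     fib = [1, 1]
--     for i in range(2, n + 1):
--         fib.append(fib[i - 1] + fib[i - 2])
--
--     total_perimeter = 0
--     for side in fib:
--         total_perimeter += 4 * side
--     return total_perimeter
-- ===== SOURCE B (Python) =====
-- def _fib_pair(k):
--     # fast doubling: returns (fib(k), fib(k+1))
--     if k == 0:
--         return (0, 1)
--     a, b = _fib_pair(k >> 1)
--     c = a * (2 * b - a)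
--     d = a * a + b * b
--     if k & 1:
--         return (d, c + d)
--     return (c, d)
--
--
-- def perimeter(n):
--     if n == 0:
--         return 4
--     f, _ = _fib_pair(n + 3)
--     return 4 * (f - 1)
-- ===== Notes on version B (the rewrite author's own statement) =====
-- stated objective: faster
-- what changed: Replaces the O(n) list-building Fibonacci loop plus summation pass with a closed-form Fibonacci sum identity computed by fast-doubling recursion.
-- outside the precondition, e.g. on perimeter(-5): A returns 8, B raises RecursionError
import Mathlib
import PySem

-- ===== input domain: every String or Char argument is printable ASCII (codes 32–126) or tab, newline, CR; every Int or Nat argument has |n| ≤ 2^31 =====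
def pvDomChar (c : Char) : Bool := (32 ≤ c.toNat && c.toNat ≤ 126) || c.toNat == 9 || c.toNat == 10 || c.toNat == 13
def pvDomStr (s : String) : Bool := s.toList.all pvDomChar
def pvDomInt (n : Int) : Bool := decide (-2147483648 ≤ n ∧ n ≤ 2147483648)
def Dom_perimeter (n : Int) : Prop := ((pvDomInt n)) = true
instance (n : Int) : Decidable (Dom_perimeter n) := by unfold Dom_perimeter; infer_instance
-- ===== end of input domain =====

-- B replaces A's O(n) Fibonacci list + summation pass by the closed form 4*(fib(n+3)-1)
-- computed with fast-doubling recursion (O(log n) multiplications).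


-- ===== PORT A =====
-- literal port of A; pyGetD … 0 is exact: during the loop the indices i-1, i-2
-- are always in range (fib has length i when index i is processed).
def perimeter (n : Int) : Int :=
  if n == 0 then 4
  else
    let fib := (PySem.List.pyRange 2 (n + 1) 1).foldl
      (fun fib i =>
        fib ++ [PySem.List.pyGetD fib (i - 1) 0 + PySem.List.pyGetD fib (i - 2) 0])
      [1, 1]
    fib.foldl (fun total side => total + 4 * side) 0

-- ===== PORT B =====
-- fast doubling: fibPair k = (fib k, fib (k+1)); B's Python recursion on k >> 1.
def fibPair (k : Nat) : Int × Int :=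
  if k = 0 then (0, 1)
  else
    let p := fibPair (k / 2)
    let a := p.1
    let b := p.2
    let c := a * (2 * b - a)
    let d := a * a + b * b
    if k % 2 = 1 then (d, c + d) else (c, d)
decreasing_by exact Nat.div_lt_self (Nat.pos_of_ne_zero (by assumption)) (by omega)

-- (n+3).toNat is exact for the Pre_ domain 0 ≤ n; B's Python does not return on n < 0.
def perimeter_alt (n : Int) : Int :=
  if n == 0 then 4
  else 4 * ((fibPair (n + 3).toNat).1 - 1)

-- ===== PRECONDITION & SPEC =====
-- Pre_ excludes negative n, outside the function's natural domain (a count of Fibonacci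
-- squares): there A's value is leftover initial-list state, and B's fast-doubling
-- recursion does not return (RecursionError).
def Pre_perimeter (n : Int) : Prop := 0 ≤ n
instance (n : Int) : Decidable (Pre_perimeter n) := by unfold Pre_perimeter; infer_instance
def pvWitness_perimeter : Int := 5

def Spec_perimeter (n : Int) (out : Int) : Prop := out = perimeter_alt n
instance (n : Int) (out : Int) : Decidable (Spec_perimeter n out) := by unfold Spec_perimeter; infer_instance

-- ===== CLAIM (what is proved, stated in full; the proofs are below) =====
def Claim_equal_perimeter : Prop := ∀ (n : Int), Dom_perimeter n → Pre_perimeter n → Spec_perimeter n (perimeter n)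

-- ===== LEMMAS AND PROOFS =====

-- fib 1, …, fib k as integers
def fibList (k : Nat) : List Int := (List.range k).map (fun i => (Nat.fib (i + 1) : Int))

theorem fibPair_eq (k : Nat) : fibPair k = ((Nat.fib k : Int), (Nat.fib (k + 1) : Int)) := by
  induction k using Nat.strong_induction_on with
  | _ k ih =>
    rw [fibPair]
    by_cases hk : k = 0
    · simp [hk]
    · simp only [hk, if_false]
      have hsub : Nat.fib (k / 2) ≤ 2 * Nat.fib (k / 2 + 1) := by
        have := @Nat.fib_le_fib_succ (k / 2); omega
      have hsub' : Nat.fib (k / 2 + 1) ≤ 2 * Nat.fib (k / 2 + 1 + 1) := by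
        have := @Nat.fib_le_fib_succ (k / 2 + 1); omega
      rw [ih (k / 2) (Nat.div_lt_self (Nat.pos_of_ne_zero hk) (by omega))]
      obtain ⟨m, hm | hm⟩ := Nat.even_or_odd' k
      · have hdiv : k / 2 = m := by omega
        have hmod : ¬ k % 2 = 1 := by omega
        simp only [hmod, if_false]
        rw [Prod.mk.injEq, hdiv]
        refine ⟨?_, ?_⟩
        · rw [hm, Nat.fib_two_mul, Nat.cast_mul, Nat.cast_sub (hdiv ▸ hsub)]
          push_cast; ring
        · have h1 : k + 1 = 2 * m + 1 := by omega
          rw [h1, Nat.fib_two_mul_add_one]; push_cast; ring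
      · have hdiv : k / 2 = m := by omega
        have hmod : k % 2 = 1 := by omega
        simp only [hmod, if_true]
        rw [Prod.mk.injEq, hdiv]
        refine ⟨?_, ?_⟩
        · rw [hm, Nat.fib_two_mul_add_one]; push_cast; ring
        · have h1 : k + 1 = 2 * (m + 1) := by omega
          rw [h1, Nat.fib_two_mul, Nat.cast_mul, Nat.cast_sub (hdiv ▸ hsub'),
            Nat.fib_add_two]
          push_cast; ring

-- A's loop builds exactly fib 1 … fib (m+2)
theorem loopA (m : Nat) :
    (PySem.List.pyRange 2 ((m : Int) + 2) 1).foldl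
      (fun fib i =>
        fib ++ [PySem.List.pyGetD fib (i - 1) 0 + PySem.List.pyGetD fib (i - 2) 0])
      [1, 1] = fibList (m + 2) := by
  induction m with
  | zero =>
    rw [PySem.List.pyRange_one_eq_nil (by omega)]
    simp [fibList, List.range_succ]
  | succ m ih =>
    have hsplit : PySem.List.pyRange 2 ((m : Int) + 1 + 2) 1
        = PySem.List.pyRange 2 ((m : Int) + 2) 1 ++ [(m : Int) + 2] := by
      have := PySem.List.pyRange_one_succ_right (show (2:Int) ≤ (m : Int) + 2 by omega)
      simpa using this
    push_cast
    rw [hsplit, List.foldl_append, ih]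
    simp only [List.foldl_cons, List.foldl_nil]
    rw [show ((m:Int) + 2 - 1) = ((m+1:Nat) : Int) by push_cast; ring,
        show ((m:Int) + 2 - 2) = ((m:Nat) : Int) by ring,
        PySem.List.pyGetD_natCast, PySem.List.pyGetD_natCast]
    have hg1 : (fibList (m+2)).getD (m+1) 0 = (Nat.fib (m+2) : Int) := by
      simp [fibList, List.getD]
    have hg2 : (fibList (m+2)).getD m 0 = (Nat.fib (m+1) : Int) := by
      simp [fibList, List.getD]
    rw [hg1, hg2]
    have : fibList (m + 1 + 2) = fibList (m + 2) ++ [(Nat.fib (m + 3) : Int)] := by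
      simp [fibList, List.range_succ]
    rw [this]
    have hfib : Nat.fib (m + 3) = Nat.fib (m + 1) + Nat.fib (m + 2) := Nat.fib_add_two
    rw [hfib]
    push_cast; ring_nf

theorem foldl_four_sum (L : List Int) (t : Int) :
    L.foldl (fun total side => total + 4 * side) t = t + 4 * L.sum := by
  induction L generalizing t with
  | nil => simp
  | cons x xs ih => simp [ih]; ring

theorem fibList_sum (k : Nat) : (fibList k).sum = (Nat.fib (k + 2) : Int) - 1 := by
  induction k with
  | zero => simp [fibList]
  | succ k ih =>
    have : fibList (k + 1) = fibList k ++ [(Nat.fib (k + 1) : Int)] := by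
      simp [fibList, List.range_succ]
    rw [this, List.sum_append, ih]
    have : Nat.fib (k + 3) = Nat.fib (k + 1) + Nat.fib (k + 2) := Nat.fib_add_two
    simp [this]
    ring

-- ===== VERDICT (by name: the statement is the Claim_ definition above) =====
theorem perimeter_spec : Claim_equal_perimeter := by
  intro n _ hpre
  unfold Spec_perimeter perimeter perimeter_alt
  by_cases h0 : n = 0
  · simp [h0]
  · have hn1 : 1 ≤ n := by
      have : 0 ≤ n := hpre; omega
    have hne : (n == 0) = false := by simp [h0]
    simp only [hne, Bool.false_eq_true, if_false]
    obtain ⟨m, hm⟩ : ∃ m : Nat, n = (m : Int) + 1 := ⟨(n - 1).toNat, by omega⟩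
    have harg : n + 1 = (m : Int) + 2 := by omega
    rw [harg, loopA m, foldl_four_sum, fibList_sum]
    have htn : (n + 3).toNat = m + 4 := by omega
    rw [htn, fibPair_eq]
    push_cast; ring
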